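-- pv_equiv track=rewrite | github.com/prashanthr11/Leetcode_solutions | 393-utf-8-validation/393-utf-8-validation.py | figure_out_byte
-- ===== SOURCE A (Python) =====
-- def figure_out_byte(n):
--     '''
--     Time Complexity: O(Log N)
--     Space Complexity: O(1)
--     '''
--     i = 7
--     while i:
--         if n & (1 << i):
--             i -= 1
--         else:
--             break
--
--     if i == 7:
--         return 1
--
--     if i <= 5:
--         return 7 - i
--
--     return 0
-- ===== SOURCE B (Python) =====
-- def figure_out_byte(n):
--     # Closed form: m has a 1 exactly where n has a 0 among bits 1..7;
--     # the number of leading 1-bits of n (bits 7 down, bit 0 never counted) is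
--     # 7 - (position of highest bit of m), or 7 when m == 0.
--     m = ~n & 0xFE
--     if m == 0:
--         return 7
--     c = 7 - (m.bit_length() - 1)
--     if c == 0:
--         return 1
--     if c == 1:
--         return 0
--     return c
-- ===== Notes on version B (the rewrite author's own statement) =====
-- stated objective: simpler
-- what changed: Replaces A's bit-by-bit downward while-loop scan of bits 7..1 with a single closed-form computation: mask the complement with 0xFE and read its bit_length to get the leading-ones count directly.
import Mathlib
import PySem

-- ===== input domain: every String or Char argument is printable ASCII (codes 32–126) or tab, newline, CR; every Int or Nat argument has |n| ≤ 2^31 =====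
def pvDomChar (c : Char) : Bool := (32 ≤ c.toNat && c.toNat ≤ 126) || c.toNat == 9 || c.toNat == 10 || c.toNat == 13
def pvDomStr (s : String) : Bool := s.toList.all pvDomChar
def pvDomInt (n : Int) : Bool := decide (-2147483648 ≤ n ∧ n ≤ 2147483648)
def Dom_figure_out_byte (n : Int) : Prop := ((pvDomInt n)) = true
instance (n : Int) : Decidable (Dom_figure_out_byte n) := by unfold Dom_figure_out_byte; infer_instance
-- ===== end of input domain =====

-- B replaces A's bit-by-bit downward scan with a closed-form bit_length computation (objective: simpler).

-- ===== PORT A =====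
-- while i: if n & (1 << i): i -= 1 else: break   — structural recursion on i (i : Nat since i stays in 0..7)
def fobLoop (n : Int) : Nat → Nat
  | 0 => 0
  | k + 1 => if PySem.Int.band n ((1 : Int) <<< (k + 1)) ≠ 0 then fobLoop n k else k + 1

def figure_out_byte (n : Int) : Int :=
  let i := fobLoop n 7
  if i = 7 then 1
  else if i ≤ 5 then 7 - (i : Int)
  else 0

-- ===== PORT B =====
-- Source B: m = ~n & 0xFE; if m == 0: return 7; c = 7 - (m.bit_length() - 1); …
def figure_out_byte_alt (n : Int) : Int :=
  let m : Int := PySem.Int.band (Int.not n) 254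
  if m = 0 then 7
  else
    let c : Int := 7 - ((PySem.Int.bitLength m : Int) - 1)
    if c = 0 then 1
    else if c = 1 then 0
    else c

-- ===== PRECONDITION & SPEC =====
def Spec_figure_out_byte (n : Int) (out : Int) : Prop := out = figure_out_byte_alt n
instance (n : Int) (out : Int) : Decidable (Spec_figure_out_byte n out) := by unfold Spec_figure_out_byte; infer_instance

-- ===== CLAIM (what is proved, stated in full; the proofs are below) =====
def Claim_equal_figure_out_byte : Prop := ∀ (n : Int), Dom_figure_out_byte n → Spec_figure_out_byte n (figure_out_byte n)

-- ===== LEMMAS AND PROOFS =====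

-- Bits at positions ≥ 8 of a never meet a mask < 256.
theorem land_mod (a v : Nat) (hv : v < 256) : v &&& a = v &&& (a % 256) := by
  apply Nat.eq_of_testBit_eq
  intro i
  rw [show (256 : Nat) = 2 ^ 8 from rfl]
  simp only [Nat.testBit_land, Nat.testBit_mod_two_pow]
  rcases lt_or_ge i 8 with h | h
  · simp [h]
  · have h256 : (256 : Nat) ≤ 2 ^ i := by
      calc (256 : Nat) = 2 ^ 8 := rfl
        _ ≤ 2 ^ i := Nat.pow_le_pow_right (by norm_num) h
    have hv' : v.testBit i = false := Nat.testBit_eq_false_of_lt (lt_of_lt_of_le hv h256)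
    simp [hv']

theorem band_negSucc (a v : Nat) :
    PySem.Int.band (Int.negSucc a) (Int.ofNat v) = Int.ofNat (v - (v &&& a)) := by
  simp [PySem.Int.band, Int.negSucc_eq]
  intro h
  exact absurd h (by omega)

theorem band_ofNat (a v : Nat) :
    PySem.Int.band (Int.ofNat a) (Int.ofNat v) = Int.ofNat (a &&& v) := by
  simp [PySem.Int.band]

theorem one_shiftLeft_int (j : Nat) : ((1 : Int) <<< j) = Int.ofNat (2 ^ j) := by
  show Int.shiftLeft (Int.ofNat 1) j = _
  simp [Int.shiftLeft, Nat.shiftLeft_eq]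

theorem fobLoop_congr (x y : Int)
    (h : ∀ j : Nat, j ≤ 7 → PySem.Int.band x ((1 : Int) <<< j) = PySem.Int.band y ((1 : Int) <<< j)) :
    ∀ i : Nat, i ≤ 7 → fobLoop x i = fobLoop y i := by
  intro i
  induction i with
  | zero => intro _; rfl
  | succ k ih =>
    intro hk
    simp only [fobLoop, h (k + 1) hk, ih (by omega)]

theorem A_ofNat_mod (a : Nat) : figure_out_byte (Int.ofNat a) = figure_out_byte (Int.ofNat (a % 256)) := by
  have h : ∀ j : Nat, j ≤ 7 →
      PySem.Int.band (Int.ofNat a) ((1 : Int) <<< j) = PySem.Int.band (Int.ofNat (a % 256)) ((1 : Int) <<< j) := by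
    intro j hj
    rw [one_shiftLeft_int, band_ofNat, band_ofNat, Nat.land_comm a, Nat.land_comm (a % 256),
      land_mod a (2 ^ j) (by calc 2 ^ j ≤ 2 ^ 7 := Nat.pow_le_pow_right (by norm_num) hj
                                 _ < 256 := by norm_num)]
  simp only [figure_out_byte, fobLoop_congr _ _ h 7 (le_refl 7)]

theorem A_negSucc_mod (a : Nat) : figure_out_byte (Int.negSucc a) = figure_out_byte (Int.negSucc (a % 256)) := by
  have h : ∀ j : Nat, j ≤ 7 →
      PySem.Int.band (Int.negSucc a) ((1 : Int) <<< j) = PySem.Int.band (Int.negSucc (a % 256)) ((1 : Int) <<< j) := by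
    intro j hj
    rw [one_shiftLeft_int, band_negSucc, band_negSucc,
      land_mod a (2 ^ j) (by calc 2 ^ j ≤ 2 ^ 7 := Nat.pow_le_pow_right (by norm_num) hj
                                 _ < 256 := by norm_num)]
  simp only [figure_out_byte, fobLoop_congr _ _ h 7 (le_refl 7)]

theorem B_ofNat_mod (a : Nat) : figure_out_byte_alt (Int.ofNat a) = figure_out_byte_alt (Int.ofNat (a % 256)) := by
  have hm : PySem.Int.band (Int.not (Int.ofNat a)) 254 = PySem.Int.band (Int.not (Int.ofNat (a % 256))) 254 := by
    show PySem.Int.band (Int.negSucc a) (Int.ofNat 254) = PySem.Int.band (Int.negSucc (a % 256)) (Int.ofNat 254)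
    rw [band_negSucc, band_negSucc, land_mod a 254 (by norm_num)]
  simp only [figure_out_byte_alt, hm]

theorem B_negSucc_mod (a : Nat) : figure_out_byte_alt (Int.negSucc a) = figure_out_byte_alt (Int.negSucc (a % 256)) := by
  have hm : PySem.Int.band (Int.not (Int.negSucc a)) 254 = PySem.Int.band (Int.not (Int.negSucc (a % 256))) 254 := by
    show PySem.Int.band (Int.ofNat a) (Int.ofNat 254) = PySem.Int.band (Int.ofNat (a % 256)) (Int.ofNat 254)
    rw [band_ofNat, band_ofNat, Nat.land_comm a, Nat.land_comm (a % 256), land_mod a 254 (by norm_num)]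
  simp only [figure_out_byte_alt, hm]

set_option maxRecDepth 4096 in
theorem key_ofNat : ∀ r : Nat, r < 256 → figure_out_byte (Int.ofNat r) = figure_out_byte_alt (Int.ofNat r) := by decide

set_option maxRecDepth 4096 in
theorem key_negSucc : ∀ r : Nat, r < 256 → figure_out_byte (Int.negSucc r) = figure_out_byte_alt (Int.negSucc r) := by decide

-- ===== VERDICT (by name: the statement is the Claim_ definition above) =====
theorem figure_out_byte_spec : Claim_equal_figure_out_byte := by
  intro n _
  unfold Spec_figure_out_byte
  cases n with
  | ofNat a =>
    rw [A_ofNat_mod, B_ofNat_mod]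
    exact key_ofNat (a % 256) (Nat.mod_lt _ (by norm_num))
  | negSucc a =>
    rw [A_negSucc_mod, B_negSucc_mod]
    exact key_negSucc (a % 256) (Nat.mod_lt _ (by norm_num))
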